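-- pv_equiv track=rewrite | github.com/cvooster/advent-of-code | advent_of_code/year_2019/day_04/solution.py | is_valid_p2
-- ===== SOURCE A (Python) =====
-- from itertools import pairwise
--
-- def is_valid_p2(password):
--     """Check whether the password contains a group of exactly two matching digits."""
--     group_len = 1
--     for digit_1, digit_2 in pairwise(password):
--         if digit_1 == digit_2:
--             group_len += 1
--             continue
--         if group_len == 2:
--             return True
--         group_len = 1
--     return group_len == 2
-- ===== SOURCE B (Python) =====
-- def is_valid_p2(password):
--     """Check whether the password contains a group of exactly two matching digits."""
--     n = len(password)
--     return any(
--         password[i] == password[i + 1]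
--         and (i == 0 or password[i - 1] != password[i])
--         and (i + 2 == n or password[i + 2] != password[i])
--         for i in range(n - 1)
--     )
-- ===== Notes on version B (the rewrite author's own statement) =====
-- stated objective: alternative
-- what changed: Replaced the sequential running-length counter with reset/early-return control flow by a per-index boundary test: a position starts a maximal run of exactly two iff it equals its successor and differs from both neighbours, checked independently for every index via any().
import Mathlib
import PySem

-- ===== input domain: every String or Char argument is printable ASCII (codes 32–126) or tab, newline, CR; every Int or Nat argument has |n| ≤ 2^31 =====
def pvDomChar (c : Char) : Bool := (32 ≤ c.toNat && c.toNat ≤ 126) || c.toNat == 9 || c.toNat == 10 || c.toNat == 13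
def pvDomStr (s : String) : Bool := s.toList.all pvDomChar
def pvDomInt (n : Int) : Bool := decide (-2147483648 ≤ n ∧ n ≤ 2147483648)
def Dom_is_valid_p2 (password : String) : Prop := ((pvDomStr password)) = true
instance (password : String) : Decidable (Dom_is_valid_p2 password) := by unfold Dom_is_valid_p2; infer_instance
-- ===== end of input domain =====

-- B replaces A's sequential running-length counter by an independent per-index
-- boundary test (a position starts a maximal run of exactly 2); alternative, same cost.

-- ===== PORT A =====
-- A's loop over pairwise(password) with the running counter group_len and early return;
-- the recursion carries the previous character and group_len, exactly as the Python loop does.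
def isValidP2Loop (prev : Char) (rest : List Char) (groupLen : Nat) : Bool :=
  match rest with
  | [] => groupLen == 2                 -- loop ends: return group_len == 2
  | y :: ys =>
    if prev == y then isValidP2Loop y ys (groupLen + 1)   -- group_len += 1; continue
    else if groupLen == 2 then true                       -- early return True
    else isValidP2Loop y ys 1                             -- group_len = 1

def is_valid_p2 (password : String) : Bool :=
  match password.toList with
  | [] => (1 == 2)                      -- pairwise empty: falls through to return group_len == 2
  | c :: rest => isValidP2Loop c rest 1

-- ===== PORT B =====
-- Source B: any over i in range(n-1) of a local boundary test.  Python's password[i]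
-- is always in range here (0 ≤ i, i+1, and i-1/i+2 only behind short-circuit
-- guards), so List.getD with a dummy default is an exact port of the indexing;
-- range(n-1) for n = 0 is empty, as is List.range (0 - 1) in Nat.
def is_valid_p2_alt (password : String) : Bool :=
  let l := password.toList
  let n := l.length
  (List.range (n - 1)).any (fun i =>
    (l.getD i ' ' == l.getD (i + 1) ' ')
    && ((i == 0) || !(l.getD (i - 1) ' ' == l.getD i ' '))
    && ((i + 2 == n) || !(l.getD (i + 2) ' ' == l.getD i ' ')))

-- ===== PRECONDITION & SPEC =====
def Spec_is_valid_p2 (password : String) (out : Bool) : Prop := out = is_valid_p2_alt password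
instance (password : String) (out : Bool) : Decidable (Spec_is_valid_p2 password out) := by unfold Spec_is_valid_p2; infer_instance

-- ===== CLAIM (what is proved, stated in full; the proofs are below) =====
def Claim_equal_is_valid_p2 : Prop := ∀ (password : String), Dom_is_valid_p2 password → Spec_is_valid_p2 password (is_valid_p2 password)

-- ===== LEMMAS AND PROOFS =====

-- Maximal-run lengths of c :: rest, with k the accumulated length of the current run.
def runLengths (c : Char) (n : Nat) (rest : List Char) : List Nat :=
  match rest with
  | [] => [n]
  | y :: ys => if y == c then runLengths c (n + 1) ys else n :: runLengths y 1 ys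

-- number of leading copies of c
def leadC (c : Char) : List Char → Nat
  | [] => 0
  | d :: r => if d == c then leadC c r + 1 else 0

-- run lengths after the current run of c
def afterC (c : Char) : List Char → List Nat
  | [] => []
  | d :: r => if d == c then afterC c r else runLengths d 1 r

-- structural version of B's per-index test: does some maximal run of length
-- exactly 2 start in the list, given optional previous character p?
def winP : Option Char → List Char → Bool
  | p, a :: b :: rest =>
      ((a == b) && (match p with | none => true | some q => !(q == a))
        && (match rest with | [] => true | c :: _ => !(c == a)))
      || winP (some a) (b :: rest)
  | _, _ => false

-- B's per-index test with the i = 0 previous-character check given by p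
def bIdxO (p : Option Char) (l : List Char) (i : Nat) : Bool :=
  (l.getD i ' ' == l.getD (i + 1) ' ')
  && (if i == 0 then (match p with | none => true | some q => !(q == l.getD 0 ' '))
      else !(l.getD (i - 1) ' ' == l.getD i ' '))
  && ((i + 2 == l.length) || !(l.getD (i + 2) ' ' == l.getD i ' '))

theorem loop_eq_runs (rest : List Char) : ∀ (c : Char) (k : Nat),
    isValidP2Loop c rest k = (runLengths c k rest).any (fun n => n == 2) := by
  induction rest with
  | nil => intro c k; simp [isValidP2Loop, runLengths]
  | cons y ys ih =>
    intro c k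
    simp only [isValidP2Loop, runLengths]
    by_cases h : y = c
    · simp [h, ih]
    · have h1 : (c == y) = false := by simp [beq_eq_false_iff_ne]; exact fun e => h e.symm
      have h2 : (y == c) = false := by simp [beq_eq_false_iff_ne, h]
      simp only [h1, h2, if_false, List.any_cons, ih]
      by_cases hk : k = 2 <;> simp [hk]

theorem runs_decomp (rest : List Char) : ∀ (c : Char) (k : Nat),
    runLengths c k rest = (k + leadC c rest) :: afterC c rest := by
  induction rest with
  | nil => intro c k; simp [runLengths, leadC, afterC]
  | cons d r ih =>
    intro c k
    by_cases h : d = c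
    · simp only [runLengths, leadC, afterC, h, beq_self_eq_true, if_true, ih]
      congr 1; omega
    · have hb : (d == c) = false := by simp [beq_eq_false_iff_ne, h]
      simp [runLengths, leadC, afterC, hb]

theorem lead_zero_iff (rest : List Char) (c : Char) :
    ((leadC c rest == 0 : Bool)) = (match rest with | [] => true | e :: _ => !(e == c)) := by
  cases rest with
  | nil => simp [leadC]
  | cons e r =>
    by_cases h : e = c
    · simp [leadC, h]
    · have hb : (e == c) = false := by simp [beq_eq_false_iff_ne, h]
      simp [leadC, hb]

theorem win_some (rest : List Char) : ∀ (c a : Char),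
    winP (some a) (c :: rest)
      = (if a == c then afterC c rest else runLengths c 1 rest).any (fun n => n == 2) := by
  induction rest with
  | nil =>
    intro c a
    by_cases h : a = c <;> simp [winP, afterC, runLengths, h]
  | cons d r ih =>
    intro c a
    by_cases hdc : d = c
    · subst hdc
      have hrw : runLengths d 1 (d :: r) = (2 + leadC d r) :: afterC d r := by
        simp only [runLengths, beq_self_eq_true, if_true]
        simpa using runs_decomp r d 2
      by_cases hac : a = d
      · simp only [winP, hac, beq_self_eq_true, if_true, Bool.not_true, Bool.false_and,
          Bool.and_false, Bool.false_or, ih]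
        simp [afterC]
      · have hb : (a == d) = false := by simp [beq_eq_false_iff_ne, hac]
        simp only [winP, hb, hrw, ih, beq_self_eq_true, if_true, Bool.not_false,
          Bool.true_and, Bool.and_true, Bool.false_eq_true, if_false, List.any_cons]
        have h2 : ((2 + leadC d r == 2 : Bool)) = ((leadC d r == 0 : Bool)) := by
          rw [Bool.eq_iff_iff]; simp
        rw [h2, lead_zero_iff]

    · have hb : (c == d) = false := by
        simp [beq_eq_false_iff_ne]; exact fun e => hdc e.symm
      have hb' : (d == c) = false := by simp [beq_eq_false_iff_ne, hdc]
      simp only [winP, hb, Bool.false_and, Bool.false_or, ih, hb', if_false]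
      by_cases hac : a = c
      · simp [hac, afterC, hb']
      · have hac' : (a == c) = false := by simp [beq_eq_false_iff_ne, hac]
        simp [hac', runLengths, hb']

theorem win_none (rest : List Char) : ∀ (c : Char),
    winP none (c :: rest) = (runLengths c 1 rest).any (fun n => n == 2) := by
  intro c
  -- one unfolding step reduces to win_some with a previous character ≠ c
  cases rest with
  | nil => simp [winP, runLengths]
  | cons d r =>
    set q : Char := if c = 'a' then 'b' else 'a' with hq
    have hqc : (q == c) = false := by
      by_cases h : c = 'a'
      · simp [hq, h]
      · have h1 : ('a' == c) = false := by
          simp [beq_eq_false_iff_ne]; exact fun e => h e.symm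
        simpa [hq, h] using h1
    have : winP none (c :: d :: r) = winP (some q) (c :: d :: r) := by
      simp [winP, hqc]
    rw [this, win_some]
    have : (q == c) = false := hqc
    simp [this]

-- shifting the index-based test one position into the tail
theorem bIdxO_shift (p : Option Char) (a b : Char) (t : List Char) (i : Nat) :
    bIdxO p (a :: b :: t) (i + 1) = bIdxO (some a) (b :: t) i := by
  unfold bIdxO
  cases i with
  | zero =>
    simp only [List.getD_cons_succ, List.getD_cons_zero]
    have h3 : ((0 + 1 + 2 == (a :: b :: t).length : Bool)) = ((0 + 2 == (b :: t).length : Bool)) := by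
      simp [List.length_cons]
    rw [h3]
    rfl
  | succ j =>
    simp only [List.getD_cons_succ, List.getD_cons_zero]
    have h1 : ((j + 1 + 1 == 0 : Bool)) = false := by simp
    have h2 : ((j + 1 == 0 : Bool)) = false := by simp
    rw [h1, h2]
    simp only [Bool.false_eq_true, if_false]
    have h3 : ((j + 1 + 1 + 2 == (a :: b :: t).length : Bool))
        = ((j + 1 + 2 == (b :: t).length : Bool)) := by
      simp [List.length_cons]
    rw [h3]
    have h4 : j + 1 + 1 - 1 = j + 1 := by omega
    have h5 : j + 1 - 1 = j := by omega
    rw [h4, h5]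
    simp only [List.getD_cons_succ]

theorem any_range_eq_win (l : List Char) : ∀ (p : Option Char),
    (List.range (l.length - 1)).any (bIdxO p l) = winP p l := by
  induction l with
  | nil => intro p; simp [winP]
  | cons a t ih =>
    intro p
    cases t with
    | nil => simp [winP]
    | cons b t' =>
      have hlen : (a :: b :: t').length - 1 = (t'.length + 1) := by simp
      rw [hlen, List.range_succ_eq_map, List.any_cons, List.any_map]
      have hshift : ∀ i, (bIdxO p (a :: b :: t') ∘ Nat.succ) i = bIdxO (some a) (b :: t') i := by
        intro i
        have := bIdxO_shift p a b t' i
        simpa [Function.comp] using this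
      have hlen2 : (b :: t').length - 1 = t'.length := by simp
      have hrec : (List.range t'.length).any (bIdxO p (a :: b :: t') ∘ Nat.succ)
          = winP (some a) (b :: t') := by
        rw [funext hshift]
        have := ih (some a)
        rw [hlen2] at this
        exact this
      rw [hrec]
      -- head test at i = 0
      congr 1
      unfold bIdxO
      simp only [List.getD_cons_zero, List.getD_cons_succ, if_true]
      cases t' with
      | nil =>
        simp
      | cons e r =>
        have hfalse : ((0 + 2 == (a :: b :: e :: r).length : Bool)) = false := by
          simp [List.length_cons]
        rw [hfalse]
        simp

-- B's literal test equals bIdxO none pointwise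
theorem bidx_none (l : List Char) (i : Nat) :
    ((l.getD i ' ' == l.getD (i + 1) ' ')
      && ((i == 0) || !(l.getD (i - 1) ' ' == l.getD i ' '))
      && ((i + 2 == l.length) || !(l.getD (i + 2) ' ' == l.getD i ' ')))
    = bIdxO none l i := by
  unfold bIdxO
  cases i with
  | zero => simp
  | succ j => simp

-- ===== VERDICT (by name: the statement is the Claim_ definition above) =====
theorem is_valid_p2_spec : Claim_equal_is_valid_p2 := by
  intro password _
  unfold Spec_is_valid_p2 is_valid_p2
  have halt : is_valid_p2_alt password
      = (List.range (password.toList.length - 1)).any (bIdxO none password.toList) := by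
    unfold is_valid_p2_alt
    exact congrArg _ (funext (bidx_none password.toList))
  rw [halt, any_range_eq_win]
  cases h : password.toList with
  | nil => simp [winP]
  | cons c rest =>
    rw [win_none]
    exact loop_eq_runs rest c 1
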